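-- pv_equiv track=rewrite | github.com/jifan-chen/multi_reasoning | my_library/dataset_readers/hotpot_chain_reranker.py | preprocess_global_info
-- ===== SOURCE A (Python) =====
-- def preprocess_global_info(pragraphs, sp_set):
--     global_id = 0
--     all_sents = []
--     sp_facts_id = []
--     sent_labels = []
--     for para in pragraphs:
--         cur_title, cur_para = para[0], para[1]
--         for sent_id, sent in enumerate(cur_para):
--             all_sents.append(sent)
--             if (cur_title, sent_id) in sp_set:
--                 sp_facts_id.append(global_id)
--                 sent_labels.append(1)
--             else:
--                 sent_labels.append(0)
--             global_id += 1
--     return all_sents, sp_facts_id, sent_labels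
-- ===== SOURCE B (Python) =====
-- def preprocess_global_info(pragraphs, sp_set):
--     # Inverted iteration: index paragraphs by title with flat start offsets,
--     # then iterate over sp_set to mark flat supporting-fact positions.
--     all_sents = []
--     index = {}
--     for title, para in pragraphs:
--         index.setdefault(title, []).append((len(all_sents), len(para)))
--         all_sents.extend(para)
--     marked = set()
--     for title, sid in sp_set:
--         for start, length in index.get(title, []):
--             if 0 <= sid < length:
--                 marked.add(start + sid)
--     sent_labels = [1 if i in marked else 0 for i in range(len(all_sents))]
--     sp_facts_id = sorted(marked)
--     return all_sents, sp_facts_id, sent_labels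
-- ===== Notes on version B (the rewrite author's own statement) =====
-- stated objective: alternative
-- what changed: Inverts the iteration: instead of testing every sentence's (title, sent_id) against sp_set, B builds a title->(flat start offset, length) index of the paragraphs in one pass, then iterates over sp_set to mark the flat positions of supporting facts in a set, deriving sent_labels by set membership and sp_facts_id by sorting the marked set.
import Mathlib
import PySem

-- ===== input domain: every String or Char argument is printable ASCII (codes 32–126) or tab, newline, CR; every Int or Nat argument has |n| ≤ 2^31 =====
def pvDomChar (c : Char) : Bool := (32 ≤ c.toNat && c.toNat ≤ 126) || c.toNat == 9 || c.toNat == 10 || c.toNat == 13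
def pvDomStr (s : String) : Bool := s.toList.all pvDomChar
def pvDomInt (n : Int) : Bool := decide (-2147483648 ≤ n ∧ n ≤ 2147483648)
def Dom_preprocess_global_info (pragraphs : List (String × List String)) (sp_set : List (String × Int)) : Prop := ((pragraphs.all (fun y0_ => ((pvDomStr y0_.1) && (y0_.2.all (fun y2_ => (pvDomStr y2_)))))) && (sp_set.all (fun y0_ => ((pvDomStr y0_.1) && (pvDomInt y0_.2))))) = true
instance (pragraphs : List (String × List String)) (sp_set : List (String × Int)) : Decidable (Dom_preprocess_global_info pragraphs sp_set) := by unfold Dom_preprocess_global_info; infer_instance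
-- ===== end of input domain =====

-- B inverts the iteration: it indexes paragraphs by title with flat start offsets, marks supporting
-- positions by iterating sp_set into a set, and derives labels/ids from that set (objective: alternative).


-- ===== PORT A =====
-- body of A's inner loop: state = (global_id, all_sents, sp_facts_id, sent_labels)
def pgiInnerStep (sp_set : List (String × Int)) (cur_title : String)
    (st : Int × List String × List Int × List Int) (p : Int × String) :
    Int × List String × List Int × List Int :=
  let (global_id, all_sents, sp_facts_id, sent_labels) := st
  let all_sents := all_sents ++ [p.2]
  if (cur_title, p.1) ∈ sp_set then
    (global_id + 1, all_sents, sp_facts_id ++ [global_id], sent_labels ++ [1])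
  else
    (global_id + 1, all_sents, sp_facts_id, sent_labels ++ [0])

-- body of A's outer loop
def pgiOuterStep (sp_set : List (String × Int))
    (st : Int × List String × List Int × List Int) (para : String × List String) :
    Int × List String × List Int × List Int :=
  (PySem.List.enumerate para.2 0).foldl (pgiInnerStep sp_set para.1) st

def preprocess_global_info (pragraphs : List (String × List String)) (sp_set : List (String × Int)) : List String × List Int × List Int :=
  let st := pragraphs.foldl (pgiOuterStep sp_set) ((0 : Int), [], [], [])
  (st.2.1, st.2.2.1, st.2.2.2)

-- ===== PORT B =====
-- index.setdefault(title, []).append((len(all_sents), len(para))); all_sents.extend(para)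
def pgiIndexStep (st : List String × PySem.Dict String (List (Int × Int))) (p : String × List String) :
    List String × PySem.Dict String (List (Int × Int)) :=
  (st.1 ++ p.2, st.2.insert p.1 (st.2.getD p.1 [] ++ [((st.1.length : Int), (p.2.length : Int))]))

-- inner loop of B's marking pass: for start, length in index.get(title, []): if 0 <= sid < length: marked.add(start+sid)
def pgiMarkStep (idx : PySem.Dict String (List (Int × Int)))
    (m : PySem.Set Int) (q : String × Int) : PySem.Set Int :=
  (idx.getD q.1 []).foldl
    (fun m r => if 0 ≤ q.2 ∧ q.2 < r.2 then PySem.Set.add m (r.1 + q.2) else m) m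

def preprocess_global_info_alt (pragraphs : List (String × List String)) (sp_set : List (String × Int)) : List String × List Int × List Int :=
  let st := pragraphs.foldl pgiIndexStep ([], PySem.Dict.empty)
  let all_sents := st.1
  let idx := st.2
  let marked := sp_set.foldl (pgiMarkStep idx) PySem.Set.empty
  let sent_labels := (PySem.List.pyRange 0 (all_sents.length : Int) 1).map
    (fun i => if PySem.Set.contains marked i then (1 : Int) else 0)
  let sp_facts_id := PySem.List.sorted marked (fun x => x) false
  (all_sents, sp_facts_id, sent_labels)

-- ===== PRECONDITION & SPEC =====
def Spec_preprocess_global_info (pragraphs : List (String × List String)) (sp_set : List (String × Int)) (out : List String × List Int × List Int) : Prop := out = preprocess_global_info_alt pragraphs sp_set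
instance (pragraphs : List (String × List String)) (sp_set : List (String × Int)) (out : List String × List Int × List Int) : Decidable (Spec_preprocess_global_info pragraphs sp_set out) := by unfold Spec_preprocess_global_info; infer_instance

-- ===== CLAIM (what is proved, stated in full; the proofs are below) =====
def Claim_equal_preprocess_global_info : Prop := ∀ (pragraphs : List (String × List String)) (sp_set : List (String × Int)), Dom_preprocess_global_info pragraphs sp_set → Spec_preprocess_global_info pragraphs sp_set (preprocess_global_info pragraphs sp_set)

-- ===== LEMMAS AND PROOFS =====

-- the label list A produces for one paragraph, in structural form
def pvLabels (sp_set : List (String × Int)) (title : String) : Int → List String → List Int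
  | _, [] => []
  | j, _ :: ss => (if (title, j) ∈ sp_set then (1 : Int) else 0) :: pvLabels sp_set title (j + 1) ss

-- all labels produced for a list of paragraphs
def pvBL (sp_set : List (String × Int)) (ps : List (String × List String)) : List Int :=
  ps.flatMap (fun p => pvLabels sp_set p.1 0 p.2)

-- indices of nonzero entries, counting from k
def pvIds : Int → List Int → List Int
  | _, [] => []
  | k, l :: ls => (if l ≠ 0 then [k] else []) ++ pvIds (k + 1) ls

-- the (flat start, length) entries B's index holds for a given title
def pvIdxEntries (t : String) : Int → List (String × List String) → List (Int × Int)
  | _, [] => []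
  | off, p :: ps =>
      (if p.1 = t then [(off, (p.2.length : Int))] else []) ++ pvIdxEntries t (off + p.2.length) ps

theorem pvLabels_length (sp_set : List (String × Int)) (title : String) :
    ∀ (ss : List String) (j : Int), (pvLabels sp_set title j ss).length = ss.length := by
  intro ss
  induction ss with
  | nil => intro j; simp [pvLabels]
  | cons s ss ih => intro j; simp [pvLabels, ih]

theorem pvIds_append :
    ∀ (xs ys : List Int) (k : Int),
      pvIds k (xs ++ ys) = pvIds k xs ++ pvIds (k + xs.length) ys := by
  intro xs
  induction xs with
  | nil => intro ys k; simp [pvIds]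
  | cons x xs ih =>
    intro ys k
    simp only [List.cons_append, pvIds, ih, List.length_cons, List.append_assoc]
    congr 2
    push_cast
    ring_nf

theorem pvIds_ge : ∀ (ls : List Int) (k i : Int), i ∈ pvIds k ls → k ≤ i := by
  intro ls
  induction ls with
  | nil => intro k i h; simp [pvIds] at h
  | cons l ls ih =>
    intro k i h
    simp only [pvIds, List.mem_append] at h
    rcases h with h | h
    · rcases Decidable.em (l ≠ 0) with hl | hl
      · rw [if_pos hl] at h; simp at h; omega
      · rw [if_neg hl] at h; simp at h
    · have := ih (k + 1) i h; omega

theorem pvIds_pairwise : ∀ (ls : List Int) (k : Int), (pvIds k ls).Pairwise (· < ·) := by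
  intro ls
  induction ls with
  | nil => intro k; simp [pvIds]
  | cons l ls ih =>
    intro k
    simp only [pvIds]
    apply List.pairwise_append.2
    refine ⟨?_, ih (k + 1), ?_⟩
    · split <;> simp
    · intro a ha b hb
      have hb' := pvIds_ge ls (k + 1) b hb
      split at ha <;> simp at ha
      omega

theorem pgi_inner (sp_set : List (String × Int)) (title : String) :
    ∀ (ss : List String) (j gid : Int) (alls : List String) (sp labels : List Int),
      (PySem.List.enumerate ss j).foldl (pgiInnerStep sp_set title) (gid, alls, sp, labels)
        = (gid + ss.length, alls ++ ss,
           sp ++ pvIds gid (pvLabels sp_set title j ss),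
           labels ++ pvLabels sp_set title j ss) := by
  intro ss
  induction ss with
  | nil => intro j gid alls sp labels; simp [PySem.List.enumerate, pvLabels, pvIds]
  | cons s ss ih =>
    intro j gid alls sp labels
    simp only [PySem.List.enumerate_cons, List.foldl_cons, pgiInnerStep, pvLabels]
    by_cases h : (title, j) ∈ sp_set
    · simp only [if_pos h, ih, pvIds, List.length_cons, Prod.mk.injEq]
      refine ⟨by push_cast; ring, by simp, by simp [List.append_assoc], by simp [List.append_assoc]⟩
    · simp only [if_neg h, ih, pvIds, List.length_cons, Prod.mk.injEq]
      refine ⟨by push_cast; ring, by simp, by simp, by simp [List.append_assoc]⟩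

theorem pgi_outer (sp_set : List (String × Int)) :
    ∀ (ps : List (String × List String)) (gid : Int) (alls : List String) (sp labels : List Int),
      ps.foldl (pgiOuterStep sp_set) (gid, alls, sp, labels)
        = (gid + (pvBL sp_set ps).length, alls ++ ps.flatMap (fun p => p.2),
           sp ++ pvIds gid (pvBL sp_set ps), labels ++ pvBL sp_set ps) := by
  intro ps
  induction ps with
  | nil => intro gid alls sp labels; simp [pvBL, pvIds]
  | cons p ps ih =>
    intro gid alls sp labels
    simp only [List.foldl_cons, pgiOuterStep, pgi_inner, ih, pvBL, List.flatMap_cons,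
      pvIds_append, List.length_append, pvLabels_length, Prod.mk.injEq]
    refine ⟨by push_cast; ring, by simp [List.append_assoc], by simp [List.append_assoc], by simp [List.append_assoc]⟩

-- B's first pass: flat sentence list and index characterization
theorem pgi_index_fst :
    ∀ (ps : List (String × List String)) (alls : List String) (idx : PySem.Dict String (List (Int × Int))),
      (ps.foldl pgiIndexStep (alls, idx)).1 = alls ++ ps.flatMap (fun p => p.2) := by
  intro ps
  induction ps with
  | nil => intro alls idx; simp
  | cons p ps ih => intro alls idx; simp [pgiIndexStep, ih]

theorem pgi_index_getD :
    ∀ (ps : List (String × List String)) (alls : List String) (idx : PySem.Dict String (List (Int × Int))) (t : String),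
      ((ps.foldl pgiIndexStep (alls, idx)).2).getD t []
        = idx.getD t [] ++ pvIdxEntries t (alls.length : Int) ps := by
  intro ps
  induction ps with
  | nil => intro alls idx t; simp [pvIdxEntries]
  | cons p ps ih =>
    intro alls idx t
    simp only [List.foldl_cons, pgiIndexStep]
    rw [ih]
    have hlen : (((alls ++ p.2).length : Nat) : Int) = (alls.length : Int) + (p.2.length : Int) := by
      simp
    rw [hlen, PySem.Dict.getD_insert]
    by_cases h : t = p.1
    · subst h
      rw [if_pos rfl]
      simp [pvIdxEntries, List.append_assoc]
    · have h' : ¬ p.1 = t := fun e => h e.symm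
      rw [if_neg h]
      simp [pvIdxEntries, h']

-- membership in B's marked set
theorem mem_markInner (q : String × Int) :
    ∀ (es : List (Int × Int)) (m : PySem.Set Int) (i : Int),
      i ∈ es.foldl (fun m r => if 0 ≤ q.2 ∧ q.2 < r.2 then PySem.Set.add m (r.1 + q.2) else m) m
        ↔ i ∈ m ∨ ∃ r ∈ es, 0 ≤ q.2 ∧ q.2 < r.2 ∧ i = r.1 + q.2 := by
  intro es
  induction es with
  | nil => intro m i; simp
  | cons e es ih =>
    intro m i
    simp only [List.foldl_cons, ih, List.mem_cons]
    by_cases h : 0 ≤ q.2 ∧ q.2 < e.2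
    · simp only [if_pos h, PySem.Set.mem_add]
      constructor
      · rintro ((hm | he) | ⟨r, hr, h1, h2, h3⟩)
        · exact Or.inl hm
        · exact Or.inr ⟨e, Or.inl rfl, h.1, h.2, he⟩
        · exact Or.inr ⟨r, Or.inr hr, h1, h2, h3⟩
      · rintro (hm | ⟨r, (rfl | hr), h1, h2, h3⟩)
        · exact Or.inl (Or.inl hm)
        · exact Or.inl (Or.inr h3)
        · exact Or.inr ⟨r, hr, h1, h2, h3⟩
    · simp only [if_neg h]
      constructor
      · rintro (hm | ⟨r, hr, h1, h2, h3⟩)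
        · exact Or.inl hm
        · exact Or.inr ⟨r, Or.inr hr, h1, h2, h3⟩
      · rintro (hm | ⟨r, (rfl | hr), h1, h2, h3⟩)
        · exact Or.inl hm
        · exact absurd ⟨h1, h2⟩ h
        · exact Or.inr ⟨r, hr, h1, h2, h3⟩

theorem mem_marked (idx : PySem.Dict String (List (Int × Int))) :
    ∀ (qs : List (String × Int)) (m : PySem.Set Int) (i : Int),
      i ∈ qs.foldl (pgiMarkStep idx) m
        ↔ i ∈ m ∨ ∃ q ∈ qs, ∃ r ∈ idx.getD q.1 [], 0 ≤ q.2 ∧ q.2 < r.2 ∧ i = r.1 + q.2 := by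
  intro qs
  induction qs with
  | nil => intro m i; simp
  | cons q qs ih =>
    intro m i
    rw [List.foldl_cons, ih]
    unfold pgiMarkStep
    rw [mem_markInner q]
    simp only [List.mem_cons]
    constructor
    · rintro ((hm | he) | ⟨q', hq', hrest⟩)
      · exact Or.inl hm
      · exact Or.inr ⟨q, Or.inl rfl, he⟩
      · exact Or.inr ⟨q', Or.inr hq', hrest⟩
    · rintro (hm | ⟨q', (rfl | hq'), hrest⟩)
      · exact Or.inl (Or.inl hm)
      · exact Or.inl (Or.inr hrest)
      · exact Or.inr ⟨q', hq', hrest⟩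

theorem nodup_markInner (q : String × Int) :
    ∀ (es : List (Int × Int)) (m : PySem.Set Int), m.Nodup →
      (es.foldl (fun m r => if 0 ≤ q.2 ∧ q.2 < r.2 then PySem.Set.add m (r.1 + q.2) else m) m).Nodup := by
  intro es
  induction es with
  | nil => intro m hm; exact hm
  | cons e es ih =>
    intro m hm
    simp only [List.foldl_cons]
    apply ih
    split
    · exact PySem.Set.nodup_add _ _ hm
    · exact hm

theorem nodup_marked (idx : PySem.Dict String (List (Int × Int))) :
    ∀ (qs : List (String × Int)) (m : PySem.Set Int), m.Nodup →
      (qs.foldl (pgiMarkStep idx) m).Nodup := by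
  intro qs
  induction qs with
  | nil => intro m hm; exact hm
  | cons q qs ih =>
    intro m hm
    exact ih _ (nodup_markInner q _ m hm)

-- one paragraph: positions pvIds finds = positions derivable from sp_set entries for that title
theorem para_cond (sp_set : List (String × Int)) (t : String) :
    ∀ (ss : List String) (j off i : Int),
      i ∈ pvIds off (pvLabels sp_set t j ss)
        ↔ ∃ sid : Int, (t, sid) ∈ sp_set ∧ j ≤ sid ∧ sid < j + ss.length ∧ i = off + (sid - j) := by
  intro ss
  induction ss with
  | nil => intro j off i; simp [pvLabels, pvIds]; omega
  | cons s ss ih =>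
    intro j off i
    simp only [pvLabels, pvIds, List.mem_append, List.length_cons]
    constructor
    · rintro (h | h)
      · by_cases hj : (t, j) ∈ sp_set
        · simp [hj] at h
          exact ⟨j, hj, le_refl j, by omega, by omega⟩
        · simp [hj] at h
      · obtain ⟨sid, h1, h2, h3, h4⟩ := (ih (j + 1) (off + 1) i).1 h
        exact ⟨sid, h1, by omega, by omega, by omega⟩
    · rintro ⟨sid, h1, h2, h3, h4⟩
      by_cases hsj : sid = j
      · subst hsj
        left
        simp [h1]; omega
      · right
        apply (ih (j + 1) (off + 1) i).2
        exact ⟨sid, h1, by omega, by omega, by omega⟩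

-- global: the marked condition over index entries = membership in pvIds of the label list
theorem entries_cond (sp_set : List (String × Int)) :
    ∀ (ps : List (String × List String)) (off i : Int),
      (∃ q ∈ sp_set, ∃ r ∈ pvIdxEntries q.1 off ps, 0 ≤ q.2 ∧ q.2 < r.2 ∧ i = r.1 + q.2)
        ↔ i ∈ pvIds off (pvBL sp_set ps) := by
  intro ps
  induction ps with
  | nil => intro off i; simp [pvIdxEntries, pvBL, pvIds]
  | cons p ps ih =>
    intro off i
    have hlen := pvLabels_length sp_set p.1 p.2 0
    simp only [pvBL, List.flatMap_cons, pvIds_append, hlen, List.mem_append]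
    constructor
    · rintro ⟨q, hq, r, hr, h1, h2, h3⟩
      simp only [pvIdxEntries, List.mem_append] at hr
      rcases hr with hr | hr
      · by_cases ht : p.1 = q.1
        · simp [ht] at hr
          subst hr
          left
          apply (para_cond sp_set p.1 p.2 0 off i).2
          refine ⟨q.2, ?_, h1, by simpa using h2, by omega⟩
          rw [ht]; exact hq
        · simp [ht] at hr
      · right
        rw [← pvBL]
        exact (ih (off + p.2.length) i).1 ⟨q, hq, r, hr, h1, h2, h3⟩
    · rintro (h | h)
      · obtain ⟨sid, h1, h2, h3, h4⟩ := (para_cond sp_set p.1 p.2 0 off i).1 h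
        refine ⟨(p.1, sid), h1, (off, (p.2.length : Int)), ?_, h2, by simpa using h3, by omega⟩
        simp [pvIdxEntries]
      · rw [← pvBL] at h
        obtain ⟨q, hq, r, hr, hrest⟩ := (ih (off + p.2.length) i).2 h
        refine ⟨q, hq, r, ?_, hrest⟩
        simp only [pvIdxEntries, List.mem_append]
        exact Or.inr hr

-- entries of the label list are 0 or 1
theorem pvBL_mem01 (sp_set : List (String × Int)) :
    ∀ (ps : List (String × List String)) (x : Int), x ∈ pvBL sp_set ps → x = 0 ∨ x = 1 := by
  have hlab : ∀ (t : String) (ss : List String) (j : Int) (x : Int),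
      x ∈ pvLabels sp_set t j ss → x = 0 ∨ x = 1 := by
    intro t ss
    induction ss with
    | nil => intro j x h; simp [pvLabels] at h
    | cons s ss ih =>
      intro j x h
      simp only [pvLabels, List.mem_cons] at h
      rcases h with h | h
      · split at h <;> simp [h]
      · exact ih (j + 1) x h
  intro ps x h
  simp only [pvBL, List.mem_flatMap] at h
  obtain ⟨p, _, hp⟩ := h
  exact hlab p.1 p.2 0 x hp

theorem pvBL_length (sp_set : List (String × Int)) :
    ∀ (ps : List (String × List String)),
      ((ps.flatMap (fun p => p.2)).length : Int) = ((pvBL sp_set ps).length : Int) := by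
  intro ps
  induction ps with
  | nil => simp [pvBL]
  | cons p ps ih =>
    simp only [pvBL, List.flatMap_cons, List.length_append, pvLabels_length] at *
    push_cast at *
    omega

-- the indicator map over a range reconstructs the label list
theorem pvMapIndicator :
    ∀ (ls : List Int) (k : Int),
      (∀ x ∈ ls, x = 0 ∨ x = 1) →
      (PySem.List.pyRange k (k + ls.length) 1).map
        (fun i => if i ∈ pvIds k ls then (1 : Int) else 0) = ls := by
  intro ls
  induction ls with
  | nil => intro k _; simp [PySem.List.pyRange_one_eq_nil]
  | cons l ls ih =>
    intro k h01
    have hk : k < k + (l :: ls).length := by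
      simp only [List.length_cons]; push_cast; omega
    rw [PySem.List.pyRange_one_cons hk, List.map_cons]
    have hmem : ∀ i : Int, i ∈ pvIds k (l :: ls) ↔ (l ≠ 0 ∧ i = k) ∨ i ∈ pvIds (k + 1) ls := by
      intro i
      simp only [pvIds, List.mem_append]
      constructor
      · rintro (h | h)
        · split at h <;> simp_all
        · exact Or.inr h
      · rintro (⟨h1, h2⟩ | h)
        · left; simp [h1, h2]
        · exact Or.inr h
    have hknot : k ∉ pvIds (k + 1) ls := fun h => by have := pvIds_ge ls (k + 1) k h; omega
    have hhead : (if k ∈ pvIds k (l :: ls) then (1 : Int) else 0) = l := by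
      rw [if_congr (hmem k) rfl rfl]
      rcases h01 l (List.mem_cons_self) with h | h
      · subst h; simp [hknot]
      · subst h; simp [hknot]
    rw [hhead]
    congr 1
    have hend : k + ((l :: ls).length : Int) = (k + 1) + ls.length := by simp only [List.length_cons]; push_cast; omega
    rw [hend]
    have hcg : ((PySem.List.pyRange (k + 1) ((k + 1) + ls.length) 1).map
        (fun i => if i ∈ pvIds k (l :: ls) then (1 : Int) else 0))
        = (PySem.List.pyRange (k + 1) ((k + 1) + ls.length) 1).map
        (fun i => if i ∈ pvIds (k + 1) ls then (1 : Int) else 0) := by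
      apply List.map_congr_left
      intro i hi
      have hik : k + 1 ≤ i := (PySem.List.mem_pyRange_one.1 hi).1
      rw [if_congr (hmem i) rfl rfl]
      have hiff : ((l ≠ 0 ∧ i = k) ∨ i ∈ pvIds (k + 1) ls) ↔ i ∈ pvIds (k + 1) ls := by
        constructor
        · rintro (⟨_, rfl⟩ | h)
          · omega
          · exact h
        · exact Or.inr
      rw [if_congr hiff rfl rfl]
    rw [hcg]
    exact ih (k + 1) (fun x hx => h01 x (List.mem_cons_of_mem l hx))

-- ===== VERDICT (by name: the statement is the Claim_ definition above) =====
theorem preprocess_global_info_spec : Claim_equal_preprocess_global_info := by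
  intro pragraphs sp_set _
  unfold Spec_preprocess_global_info preprocess_global_info preprocess_global_info_alt
  simp only [pgi_outer, pgi_index_fst, List.nil_append]
  set idx := (pragraphs.foldl pgiIndexStep ([], PySem.Dict.empty)).2 with hidx
  set marked := sp_set.foldl (pgiMarkStep idx) PySem.Set.empty with hmarked
  have hgetD : ∀ t, idx.getD t [] = pvIdxEntries t 0 pragraphs := by
    intro t
    rw [hidx, pgi_index_getD]
    simp
  have hmm : ∀ i : Int, i ∈ marked ↔ i ∈ pvIds 0 (pvBL sp_set pragraphs) := by
    intro i
    rw [hmarked, mem_marked]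
    simp only [PySem.Set.empty]
    constructor
    · rintro (h | ⟨q, hq, r, hr, hrest⟩)
      · simp at h
      · rw [hgetD q.1] at hr
        exact (entries_cond sp_set pragraphs 0 i).1 ⟨q, hq, r, hr, hrest⟩
    · intro h
      obtain ⟨q, hq, r, hr, hrest⟩ := (entries_cond sp_set pragraphs 0 i).2 h
      exact Or.inr ⟨q, hq, r, by rw [hgetD q.1]; exact hr, hrest⟩
  refine Prod.ext rfl (Prod.ext ?_ ?_)
  · -- sp_facts_id
    show pvIds 0 (pvBL sp_set pragraphs) = PySem.List.sorted marked (fun x => x) false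
    symm
    apply PySem.List.sorted_eq_of_perm_of_pairwise_lt
    · apply (List.perm_ext_iff_of_nodup ?_ ?_).2
      · intro a; exact (hmm a).symm
      · exact (pvIds_pairwise (pvBL sp_set pragraphs) 0).nodup
      · exact nodup_marked idx sp_set PySem.Set.empty (by simp [PySem.Set.empty])
    · exact pvIds_pairwise (pvBL sp_set pragraphs) 0
  · -- sent_labels
    show pvBL sp_set pragraphs
        = (PySem.List.pyRange 0 (((pragraphs.flatMap (fun p => p.2)).length : Int)) 1).map
            (fun i => if PySem.Set.contains marked i then (1 : Int) else 0)
    have hlen : ((pragraphs.flatMap (fun p => p.2)).length : Int)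
        = 0 + ((pvBL sp_set pragraphs).length : Int) := by
      rw [pvBL_length, zero_add]
    rw [hlen]
    have hcongr : (PySem.List.pyRange 0 (0 + ((pvBL sp_set pragraphs).length : Int)) 1).map
            (fun i => if PySem.Set.contains marked i then (1 : Int) else 0)
        = (PySem.List.pyRange 0 (0 + ((pvBL sp_set pragraphs).length : Int)) 1).map
            (fun i => if i ∈ pvIds 0 (pvBL sp_set pragraphs) then (1 : Int) else 0) := by
      apply List.map_congr_left
      intro i _
      have : (PySem.Set.contains marked i = true) ↔ i ∈ pvIds 0 (pvBL sp_set pragraphs) :=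
        (PySem.Set.contains_iff marked i).trans (hmm i)
      rw [if_congr this rfl rfl]
    rw [hcongr]
    exact (pvMapIndicator (pvBL sp_set pragraphs) 0 (pvBL_mem01 sp_set pragraphs)).symm
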